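-- pv_equiv track=rewrite | github.com/devfrx/omnia | backend/services/thinking_parser.py | _split_at_any_partial_open
-- ===== SOURCE A (Python) =====
-- _TAG_FORMATS: list[tuple[str, str]] = [
--     ("<think>", "</think>"),
--     ("[think]", "[/think]"),
-- ]
--
-- def _split_at_any_partial_open(text: str) -> tuple[str, str]:
--     """Hold back text that could be the start of any known open tag."""
--     lower_text = text.lower()
--     earliest = len(text)
--     for open_tag, _ in _TAG_FORMATS:
--         max_check = min(len(lower_text), len(open_tag) - 1)
--         for length in range(max_check, 0, -1):
--             if open_tag.startswith(lower_text[-length:]):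
--                 earliest = min(earliest, len(text) - length)
--                 break
--     return text[:earliest], text[earliest:]
-- ===== SOURCE B (Python) =====
-- _TAG_FORMATS: list[tuple[str, str]] = [
--     ("<think>", "</think>"),
--     ("[think]", "[/think]"),
-- ]
--
-- def _split_at_any_partial_open(text: str) -> tuple[str, str]:
--     """Hold back text that could be the start of any known open tag."""
--     lower_text = text.lower()
--     max_len = max(len(open_tag) - 1 for open_tag, _ in _TAG_FORMATS)
--     for length in range(min(max_len, len(text)), 0, -1):
--         cut = len(text) - length
--         if any(open_tag.startswith(lower_text[cut:]) for open_tag, _ in _TAG_FORMATS):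
--             return text[:cut], text[cut:]
--     return text, ""
-- ===== Notes on version B (the rewrite author's own statement) =====
-- stated objective: simpler
-- what changed: Replaced A's per-tag nested loops with a running-min 'earliest' accumulator by one descending scan over candidate suffix lengths that returns the split directly at the first length any open tag matches.
import Mathlib
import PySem

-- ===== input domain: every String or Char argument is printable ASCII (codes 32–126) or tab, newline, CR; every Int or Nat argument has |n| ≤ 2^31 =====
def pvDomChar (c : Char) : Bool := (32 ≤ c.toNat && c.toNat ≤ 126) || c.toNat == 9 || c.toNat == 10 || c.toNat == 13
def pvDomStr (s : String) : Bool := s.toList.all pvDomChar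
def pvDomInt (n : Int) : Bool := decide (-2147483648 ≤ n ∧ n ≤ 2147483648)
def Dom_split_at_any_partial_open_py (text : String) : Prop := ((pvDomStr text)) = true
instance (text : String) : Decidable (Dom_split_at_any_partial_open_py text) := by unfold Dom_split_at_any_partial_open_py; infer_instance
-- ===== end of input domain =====

-- B replaces A's per-tag nested loops and running-min accumulator with one descending
-- scan over candidate suffix lengths, returning the split at the first match (objective: simpler).

-- ===== PORT A =====
def pvTagFormats : List (String × String) := [("<think>", "</think>"), ("[think]", "[/think]")]

-- inner loop of A: 'for length in range(max_check, 0, -1): if open_tag.startswith(lower_text[-length:]): earliest = min(earliest, len(text) - length); break'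
def pvTagInner (openTag lowerText : List Char) (n : Int) : List Int → Int → Int
  | [], e => e
  | l :: rest, e =>
    if PySem.Chars.startswith openTag (PySem.List.slice lowerText (some (-l)) none) then
      min e (n - l)
    else pvTagInner openTag lowerText n rest e

def split_at_any_partial_open_py (text : String) : String × String :=
  let lowerText := PySem.Chars.lower text.toList
  let n : Int := (text.toList.length : Int)
  let earliest : Int := pvTagFormats.foldl (fun e tag =>
      let maxCheck : Int := min ((lowerText.length : Int)) ((tag.1.toList.length : Int) - 1)
      pvTagInner tag.1.toList lowerText n (PySem.List.pyRange maxCheck 0 (-1)) e) n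
  (String.ofList (PySem.List.slice text.toList none (some earliest)),
   String.ofList (PySem.List.slice text.toList (some earliest) none))

-- ===== PORT B =====
-- B's loop: 'for length in range(min(max_len, len(text)), 0, -1): cut = len(text) - length; if any(...): return text[:cut], text[cut:]'
def pvScanB (textList lowerText : List Char) : List Int → String × String
  | [] => (String.ofList textList, "")
  | l :: rest =>
    let cut : Int := (textList.length : Int) - l
    if pvTagFormats.any (fun tag =>
        PySem.Chars.startswith tag.1.toList (PySem.List.slice lowerText (some cut) none)) then
      (String.ofList (PySem.List.slice textList none (some cut)),
       String.ofList (PySem.List.slice textList (some cut) none))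
    else pvScanB textList lowerText rest

def split_at_any_partial_open_py_alt (text : String) : String × String :=
  let lowerText := PySem.Chars.lower text.toList
  let maxLen : Int := (pvTagFormats.map (fun tag => ((tag.1.toList.length : Int) - 1))).foldl max ((pvTagFormats.head!.1.toList.length : Int) - 1)
  pvScanB text.toList lowerText (PySem.List.pyRange (min maxLen ((text.toList.length : Int))) 0 (-1))

-- ===== PRECONDITION & SPEC =====
def Spec_split_at_any_partial_open_py (text : String) (out : String × String) : Prop := out = split_at_any_partial_open_py_alt text
instance (text : String) (out : String × String) : Decidable (Spec_split_at_any_partial_open_py text out) := by unfold Spec_split_at_any_partial_open_py; infer_instance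

-- ===== CLAIM (what is proved, stated in full; the proofs are below) =====
def Claim_equal_split_at_any_partial_open_py : Prop := ∀ (text : String), Dom_split_at_any_partial_open_py text → Spec_split_at_any_partial_open_py text (split_at_any_partial_open_py text)

-- ===== LEMMAS AND PROOFS =====

-- A's 'earliest' after both tag loops, on the countdown range starting at m
def pvE (tl lt : List Char) (m : Nat) : Int :=
  pvTagInner "[think]".toList lt (tl.length : Int) (PySem.List.pyRange (m : Int) 0 (-1))
    (pvTagInner "<think>".toList lt (tl.length : Int) (PySem.List.pyRange (m : Int) 0 (-1)) (tl.length : Int))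

theorem pv_inner_ge (tag lt : List Char) (n : Int) (ds : List Int) (e c : Int)
    (hc : c ≤ e) (h : ∀ l ∈ ds, c ≤ n - l) : c ≤ pvTagInner tag lt n ds e := by
  induction ds generalizing e with
  | nil => exact hc
  | cons l rest ih =>
    simp only [pvTagInner]
    split
    · exact le_min hc (h l (by simp))
    · exact ih e hc (fun l' hl' => h l' (by simp [hl']))

theorem pv_inner_const (tag lt : List Char) (n : Int) (ds : List Int) (e : Int)
    (h : ∀ l ∈ ds, e ≤ n - l) : pvTagInner tag lt n ds e = e := by
  induction ds with
  | nil => rfl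
  | cons l rest ih =>
    simp only [pvTagInner]
    split
    · exact min_eq_left (h l (by simp))
    · exact ih (fun l' hl' => h l' (by simp [hl']))

theorem pv_range_cons (m : Nat) :
    PySem.List.pyRange (((m + 1 : Nat)) : Int) 0 (-1)
      = (((m + 1 : Nat)) : Int) :: PySem.List.pyRange ((m : Nat) : Int) 0 (-1) := by
  rw [PySem.List.pyRange_neg_one_cons (by exact_mod_cast Nat.succ_pos m)]
  norm_num

theorem pv_range_bound (m : Nat) (l : Int) (hl : l ∈ PySem.List.pyRange ((m : Nat) : Int) 0 (-1)) :
    0 < l ∧ l ≤ (m : Int) := by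
  rw [PySem.List.mem_pyRange_neg_one] at hl
  exact hl

theorem pv_main (tl lt : List Char) (hlen : lt.length = tl.length) :
    ∀ (m : Nat), m ≤ tl.length →
    pvScanB tl lt (PySem.List.pyRange ((m : Nat) : Int) 0 (-1)) =
      (String.ofList (PySem.List.slice tl none (some (pvE tl lt m))),
       String.ofList (PySem.List.slice tl (some (pvE tl lt m)) none)) := by
  intro m
  induction m with
  | zero =>
    intro _
    have h0 : PySem.List.pyRange ((0 : Nat) : Int) 0 (-1) = [] :=
      PySem.List.pyRange_neg_one_eq_nil (by norm_num)
    rw [pvE, h0]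
    simp [pvScanB, pvTagInner, PySem.List.slice_to_natCast, PySem.List.slice_from_natCast]
  | succ m ih =>
    intro hm1
    have hmN : m ≤ tl.length := Nat.le_of_succ_le hm1
    have hcons := pv_range_cons m
    -- the common suffix both programs test at length m+1
    have hA : PySem.List.slice lt (some (-(((m + 1 : Nat)) : Int))) none
        = lt.drop (tl.length - (m + 1)) := by
      rw [PySem.List.slice_from_neg_natCast lt (m + 1) (Nat.succ_pos m), hlen]
    have hcut : ((tl.length : Int) - ((m + 1 : Nat) : Int)) = ((tl.length - (m + 1) : Nat) : Int) := by
      omega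
    have hB : PySem.List.slice lt (some ((tl.length : Int) - ((m + 1 : Nat) : Int))) none
        = lt.drop (tl.length - (m + 1)) := by
      rw [hcut, PySem.List.slice_from_natCast]
    have hrest : ∀ l ∈ PySem.List.pyRange ((m : Nat) : Int) 0 (-1),
        (tl.length : Int) - ((m + 1 : Nat) : Int) ≤ (tl.length : Int) - l := by
      intro l hl
      have := pv_range_bound m l hl
      push_cast
      omega
    have hle : (tl.length : Int) - ((m + 1 : Nat) : Int) ≤ (tl.length : Int) := by
      push_cast; omega
    have et1 : "<think>".toList = ['<', 't', 'h', 'i', 'n', 'k', '>'] := by decide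
    have et2 : "[think]".toList = ['[', 't', 'h', 'i', 'n', 'k', ']'] := by decide
    rw [hcons]
    simp only [pvScanB, pvTagFormats, List.any_cons, List.any_nil, Bool.or_false, et1, et2, hB]
    rw [pvE, hcons]
    simp only [pvTagInner, et1, et2, hA]
    by_cases hq1 : PySem.Chars.startswith ['<', 't', 'h', 'i', 'n', 'k', '>'] (lt.drop (tl.length - (m + 1))) = true
    · rw [if_pos hq1, if_pos (by simp [hq1]), min_eq_right hle]
      by_cases hq2 : PySem.Chars.startswith ['[', 't', 'h', 'i', 'n', 'k', ']'] (lt.drop (tl.length - (m + 1))) = true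
      · rw [if_pos hq2, min_self]
      · rw [if_neg hq2, pv_inner_const _ _ _ _ _ hrest]
    · rw [if_neg hq1]
      by_cases hq2 : PySem.Chars.startswith ['[', 't', 'h', 'i', 'n', 'k', ']'] (lt.drop (tl.length - (m + 1))) = true
      · rw [if_pos (by simp [hq2]), if_pos hq2]
        have hge : (tl.length : Int) - ((m + 1 : Nat) : Int)
            ≤ pvTagInner ['<', 't', 'h', 'i', 'n', 'k', '>'] lt (tl.length : Int)
                (PySem.List.pyRange ((m : Nat) : Int) 0 (-1)) (tl.length : Int) :=
          pv_inner_ge _ _ _ _ _ _ hle hrest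
        rw [min_eq_right hge]
      · rw [if_neg (by simp [hq1, hq2]), if_neg hq2]
        exact (ih hmN).trans (by rw [pvE, et1, et2])

-- ===== VERDICT (by name: the statement is the Claim_ definition above) =====
theorem split_at_any_partial_open_py_spec : Claim_equal_split_at_any_partial_open_py := by
  intro text _
  show split_at_any_partial_open_py text = split_at_any_partial_open_py_alt text
  have hlen : (PySem.Chars.lower text.toList).length = text.toList.length := by
    simp [PySem.Chars.lower]
  have hmaxLen : ((pvTagFormats.map (fun tag => ((tag.1.toList.length : Int) - 1))).foldl max
      ((pvTagFormats.head!.1.toList.length : Int) - 1)) = 6 := by decide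
  simp only [split_at_any_partial_open_py, split_at_any_partial_open_py_alt]
  rw [hmaxLen]
  simp only [pvTagFormats, List.foldl_cons, List.foldl_nil, hlen]
  have hmin : min ((text.toList.length : Int)) ((("<think>".toList.length : Int)) - 1)
      = ((min text.toList.length 6 : Nat) : Int) := by
    have : (("<think>".toList.length : Int)) - 1 = 6 := by decide
    rw [this]
    push_cast
    rfl
  have hmin2 : min ((text.toList.length : Int)) ((("[think]".toList.length : Int)) - 1)
      = ((min text.toList.length 6 : Nat) : Int) := by
    have : (("[think]".toList.length : Int)) - 1 = 6 := by decide
    rw [this]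
    push_cast
    rfl
  have hminB : min (6 : Int) ((text.toList.length : Int)) = ((min text.toList.length 6 : Nat) : Int) := by
    push_cast
    omega
  rw [hmin, hmin2, hminB]
  exact (pv_main text.toList (PySem.Chars.lower text.toList) hlen (min text.toList.length 6)
    (min_le_left _ _)).symm
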